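-- pv_equiv track=rewrite | github.com/Certerazvi/Arkera-Coding-Test | Question2.py | get_largest_possible_loss
-- ===== SOURCE A (Python) =====
-- def get_largest_possible_loss(pricesList):
--
--     assert len(pricesList) > 1
--     assert all(x >= 0 for x in pricesList)
--
--     losses = [None] * (len(pricesList) - 1)
--     curr_max = pricesList[len(pricesList) - 1]
--
--     for i in range(len(pricesList) - 2, -1, -1):
--
--         losses[i] = curr_max - pricesList[i]
--
--         if curr_max < pricesList[i]:
--             curr_max = pricesList[i]
--
--     return max(losses)
-- ===== SOURCE B (Python) =====
-- def get_largest_possible_loss(pricesList):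
--
--     assert len(pricesList) > 1
--     assert all(x >= 0 for x in pricesList)
--
--     first, second, *rest = pricesList
--     best = second - first
--     mn = min(first, second)
--
--     for price in rest:
--         if price - mn > best:
--             best = price - mn
--         if price < mn:
--             mn = price
--
--     return best
-- ===== Notes on version B (the rewrite author's own statement) =====
-- stated objective: idiomatic
-- what changed: Replaced the backward pass that materializes a losses array (suffix max minus each price, then max over the array) with the classic forward single pass keeping a running minimum and the best difference so far, with no auxiliary array.
import Mathlib
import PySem

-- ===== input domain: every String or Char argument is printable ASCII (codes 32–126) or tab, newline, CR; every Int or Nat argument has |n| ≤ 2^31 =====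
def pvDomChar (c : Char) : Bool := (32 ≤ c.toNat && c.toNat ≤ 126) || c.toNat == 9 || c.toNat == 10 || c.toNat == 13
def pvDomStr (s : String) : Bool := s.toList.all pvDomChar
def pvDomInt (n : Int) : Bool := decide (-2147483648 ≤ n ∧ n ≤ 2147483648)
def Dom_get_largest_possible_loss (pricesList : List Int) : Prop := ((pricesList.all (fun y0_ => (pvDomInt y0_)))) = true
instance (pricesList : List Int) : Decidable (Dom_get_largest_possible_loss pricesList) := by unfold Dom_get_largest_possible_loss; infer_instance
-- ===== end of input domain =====

-- B replaces A's backward suffix-max pass with an auxiliary losses array by the classic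
-- forward single pass tracking a running minimum and the best difference so far (idiomatic, O(1) extra space).

-- ===== PORT A =====
-- the for-loop 'for i in range(len(pricesList)-2, -1, -1)' as a countdown recursion on i;
-- i is always a valid non-negative index here, so .toNat / .getD 0 are exact.
def loopA (pricesList : List Int) (i : Int) (losses : List Int) (curr_max : Int) :
    List Int × Int :=
  if i < 0 then (losses, curr_max)
  else
    let pi := (PySem.List.pyGet? pricesList i).getD 0
    loopA pricesList (i - 1) (losses.set i.toNat (curr_max - pi))
      (if curr_max < pi then pi else curr_max)
termination_by (i + 1).toNat
decreasing_by omega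

def get_largest_possible_loss (pricesList : List Int) : Int :=
  -- asserts: len > 1 and all x ≥ 0 — Pre_ below; '[None]*(n-1)' as a 0-placeholder list
  -- (every cell is written before being read)
  let losses : List Int := List.replicate (pricesList.length - 1) 0
  let curr_max : Int := (PySem.List.pyGet? pricesList ((pricesList.length : Int) - 1)).getD 0
  let st := loopA pricesList ((pricesList.length : Int) - 2) losses curr_max
  (PySem.List.max? st.1 (fun y => y)).getD 0   -- max(losses); nonempty under Pre_

-- ===== PORT B =====
def get_largest_possible_loss_alt (pricesList : List Int) : Int :=
  match pricesList with
  | first :: second :: rest =>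
      (rest.foldl
        (fun (st : Int × Int) price =>
          (if price - st.2 > st.1 then price - st.2 else st.1,
           if price < st.2 then price else st.2))
        (second - first, min first second)).1
  | _ => 0   -- Python B's assert fails here: outside Pre_

-- ===== PRECONDITION & SPEC =====
-- exactly A's asserts: at least two prices, all non-negative (AssertionError otherwise)
def Pre_get_largest_possible_loss (pricesList : List Int) : Prop :=
  1 < pricesList.length ∧ ∀ x ∈ pricesList, 0 ≤ x
instance (pricesList : List Int) : Decidable (Pre_get_largest_possible_loss pricesList) := by
  unfold Pre_get_largest_possible_loss; infer_instance
def pvWitness_get_largest_possible_loss : List Int := [3, 5, 1]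

def Spec_get_largest_possible_loss (pricesList : List Int) (out : Int) : Prop := out = get_largest_possible_loss_alt pricesList
instance (pricesList : List Int) (out : Int) : Decidable (Spec_get_largest_possible_loss pricesList out) := by unfold Spec_get_largest_possible_loss; infer_instance

-- ===== CLAIM (what is proved, stated in full; the proofs are below) =====
def Claim_equal_get_largest_possible_loss : Prop := ∀ (pricesList : List Int), Dom_get_largest_possible_loss pricesList → Pre_get_largest_possible_loss pricesList → Spec_get_largest_possible_loss pricesList (get_largest_possible_loss pricesList)

-- ===== LEMMAS AND PROOFS =====

-- losses[i] = max(pricesList[i+1:]) - pricesList[i], as a structural recursion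
def lossesSpec : List Int → List Int
  | a :: b :: l => (l.foldl max b - a) :: lossesSpec (b :: l)
  | _ => []

-- max of a nonempty list, Python-style running max
def maxHead : List Int → Int
  | [] => 0
  | x :: xs => xs.foldl max x

theorem foldl_max_init (l : List Int) : ∀ x y : Int, l.foldl max (max x y) = max (l.foldl max x) y := by
  induction l with
  | nil => intro x y; rfl
  | cons c l ih =>
    intro x y
    show l.foldl max (max (max x y) c) = max ((c :: l).foldl max x) y
    rw [show max (max x y) c = max (max x c) y by omega]
    rw [ih (max x c) y]
    rfl

theorem foldl_min_init (l : List Int) : ∀ x y : Int, l.foldl min (min x y) = min (l.foldl min x) y := by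
  induction l with
  | nil => intro x y; rfl
  | cons c l ih =>
    intro x y
    show l.foldl min (min (min x y) c) = min ((c :: l).foldl min x) y
    rw [show min (min x y) c = min (min x c) y by omega]
    rw [ih (min x c) y]
    rfl

theorem maxHead_cons_cons (x y : Int) (ys : List Int) :
    maxHead (x :: y :: ys) = max x (maxHead (y :: ys)) := by
  show ys.foldl max (max x y) = max x (ys.foldl max y)
  rw [show max x y = max y x by omega, foldl_max_init, max_comm]

theorem lossesSpec_cons (a b : Int) (l : List Int) :
    lossesSpec (a :: b :: l) = (l.foldl max b - a) :: lossesSpec (b :: l) := rfl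

-- maxHead ∘ lossesSpec as one structural recursion
def FF : Int → Int → List Int → Int
  | a, b, [] => b - a
  | a, b, c :: l => max (l.foldl max (max b c) - a) (FF b c l)

theorem FF_eq : ∀ (l : List Int) (a b : Int), maxHead (lossesSpec (a :: b :: l)) = FF a b l := by
  intro l
  induction l with
  | nil => intro a b; rfl
  | cons c t ih =>
    intro a b
    rw [lossesSpec_cons a b (c :: t), lossesSpec_cons b c t, maxHead_cons_cons,
        ← lossesSpec_cons b c t, ih b c]
    rfl

theorem loopA_neg {p ls : List Int} {cm i : Int} (h : i < 0) : loopA p i ls cm = (ls, cm) := by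
  rw [loopA]; simp [h]

theorem loopA_step {p ls : List Int} {cm i : Int} (h : ¬ i < 0) :
    loopA p i ls cm =
      loopA p (i - 1) (ls.set i.toNat (cm - (PySem.List.pyGet? p i).getD 0))
        (if cm < (PySem.List.pyGet? p i).getD 0 then (PySem.List.pyGet? p i).getD 0 else cm) := by
  rw [loopA]; simp [h]

-- shift: running A's loop on a :: q from index k down is running it on q (indices shifted by one)
-- followed by the i = 0 step on a
theorem loopA_shift (k : Nat) : ∀ (a : Int) (q losses : List Int) (x cm : Int),
    loopA (a :: q) (k : Int) (x :: losses) cm =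
      (((loopA q ((k : Int) - 1) losses cm).2 - a) :: (loopA q ((k : Int) - 1) losses cm).1,
       if (loopA q ((k : Int) - 1) losses cm).2 < a then a
       else (loopA q ((k : Int) - 1) losses cm).2) := by
  induction k with
  | zero =>
    intro a q losses x cm
    rw [loopA_step (by norm_num), loopA_neg (by norm_num), loopA_neg (by norm_num)]
    simp
  | succ k ih =>
    intro a q losses x cm
    have hcast : ((k + 1 : Nat) : Int) = (k : Int) + 1 := by push_cast; ring
    rw [hcast, loopA_step (by omega)]
    rw [PySem.List.pyGet?_cons_succ]
    have htn : ((k : Int) + 1).toNat = k + 1 := by omega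
    rw [htn, show (k : Int) + 1 - 1 = (k : Int) by ring, List.set_cons_succ]
    rw [ih]
    rw [loopA_step (p := q) (i := (k : Int)) (ls := losses) (cm := cm) (by omega)]
    simp only [Int.toNat_natCast]

-- the whole backward pass: losses = lossesSpec, curr_max = running max of the list
theorem loopA_spec : ∀ (l : List Int) (a b : Int),
    loopA (a :: b :: l) ((l.length : Int)) (List.replicate (l.length + 1) 0) (l.getLastD b) =
      (lossesSpec (a :: b :: l), if l.foldl max b < a then a else l.foldl max b) := by
  intro l
  induction l with
  | nil =>
    intro a b
    show loopA [a, b] ((0 : Nat) : Int) (0 :: []) b =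
      (lossesSpec [a, b], if b < a then a else b)
    rw [loopA_shift 0 a [b] [] 0 b, loopA_neg (by norm_num)]
    rfl
  | cons c t ih =>
    intro a b
    have h1 : (c :: t).length = t.length + 1 := rfl
    rw [h1, List.replicate_succ, List.getLastD_cons,
        loopA_shift (t.length + 1) a (b :: c :: t) (List.replicate (t.length + 1) 0) 0
          (t.getLastD c)]
    have h2 : ((t.length + 1 : Nat) : Int) - 1 = (t.length : Int) := by push_cast; ring
    rw [h2, ih b c]
    have h3 : (if t.foldl max c < b then b else t.foldl max c) = max (t.foldl max c) b := by
      split_ifs with h <;> omega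
    have h4 : (c :: t).foldl max b = max (t.foldl max c) b := by
      show t.foldl max (max b c) = _
      rw [show max b c = max c b by omega, foldl_max_init]
    rw [lossesSpec_cons a b (c :: t)]
    simp only [h3, h4]

theorem getElem?_last (l : List Int) : ∀ b : Int, (b :: l)[l.length]? = some (l.getLastD b) := by
  induction l with
  | nil => intro b; rfl
  | cons c l ih =>
    intro b
    rw [List.getLastD_cons]
    simpa using ih c

-- snoc step: appending c adds the candidate c - min(prefix)
theorem FF_snoc : ∀ (l : List Int) (a b c : Int),
    FF a b (l ++ [c]) = max (FF a b l) (c - l.foldl min (min a b)) := by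
  intro l
  induction l with
  | nil => intro a b c; show max (max b c - a) (c - b) = _; simp [FF]; omega
  | cons c' l' ih =>
    intro a b c
    show max ((l' ++ [c]).foldl max (max b c') - a) (FF b c' (l' ++ [c])) = _
    rw [ih b c' c]
    have h1 : (l' ++ [c]).foldl max (max b c') = max (l'.foldl max (max b c')) c := by
      simp [List.foldl_append]
    have h2 : (c' :: l').foldl min (min a b) = min (l'.foldl min (min b c')) a := by
      show l'.foldl min (min (min a b) c') = _
      rw [show min (min a b) c' = min (min b c') a by omega, foldl_min_init]
    rw [h1, h2]
    show _ = max (max (l'.foldl max (max b c') - a) (FF b c' l')) _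
    generalize l'.foldl max (max b c') = M
    generalize FF b c' l' = H
    generalize l'.foldl min (min b c') = m
    omega

-- the forward fold computes (max of all losses, running min)
theorem foldB_spec (a b : Int) (l : List Int) :
    l.foldl
      (fun (st : Int × Int) price =>
        (if price - st.2 > st.1 then price - st.2 else st.1,
         if price < st.2 then price else st.2))
      (b - a, min a b) =
      (FF a b l, l.foldl min (min a b)) := by
  induction l using List.reverseRecOn with
  | nil => rfl
  | append_singleton l c ih =>
    rw [List.foldl_append, List.foldl_append, ih, FF_snoc]
    simp only [List.foldl_cons, List.foldl_nil, Prod.mk.injEq]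
    constructor
    · split_ifs with h <;> omega
    · split_ifs with h <;> omega

-- ===== VERDICT (by name: the statement is the Claim_ definition above) =====
theorem get_largest_possible_loss_spec : Claim_equal_get_largest_possible_loss := by
  intro p _ hpre
  obtain ⟨hlen, -⟩ := hpre
  match p, hlen with
  | a :: b :: l, _ =>
    show get_largest_possible_loss (a :: b :: l) = get_largest_possible_loss_alt (a :: b :: l)
    have hB : get_largest_possible_loss_alt (a :: b :: l) = FF a b l := by
      show (l.foldl _ (b - a, min a b)).1 = _
      rw [foldB_spec]
    rw [hB]
    show (PySem.List.max?
        (loopA (a :: b :: l) (((a :: b :: l).length : Int) - 2)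
          (List.replicate ((a :: b :: l).length - 1) 0)
          ((PySem.List.pyGet? (a :: b :: l) (((a :: b :: l).length : Int) - 1)).getD 0)).1
        (fun y => y)).getD 0 = FF a b l
    have hlen2 : (a :: b :: l).length = l.length + 2 := by simp
    have hcm : (PySem.List.pyGet? (a :: b :: l) (((a :: b :: l).length : Int) - 1)).getD 0 =
        l.getLastD b := by
      rw [hlen2, show ((l.length + 2 : Nat) : Int) - 1 = ((l.length + 1 : Nat) : Int) by
        push_cast; ring, PySem.List.pyGet?_natCast]
      rw [List.getElem?_cons_succ, getElem?_last]
      rfl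
    have hidx : (((a :: b :: l).length : Int) - 2) = (l.length : Int) := by
      rw [hlen2]; push_cast; ring
    rw [hcm, hidx, hlen2, show l.length + 2 - 1 = l.length + 1 from rfl, loopA_spec]
    show (PySem.List.max? (lossesSpec (a :: b :: l)) (fun y => y)).getD 0 = FF a b l
    rw [lossesSpec_cons, PySem.List.max?_id_cons]
    show maxHead (lossesSpec (a :: b :: l)) = FF a b l
    rw [FF_eq]
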